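-- pv_equiv track=rewrite | github.com/Lyrete/adventofcode | 2023/13.py | find_symmetrical
-- ===== SOURCE A (Python) =====
-- def transpose(lines: list[str]) -> list[str]:
--     t_lines = []
--     for i in range(len(lines[0])):
--         t_lines.append(''.join([s[i] for s in lines]))
--
--     return t_lines
--
-- def reverse(s: str):
--     s = list(s)
--     s.reverse()
--     return "".join(s)
--
-- def check_symmetry(left: str, right: str) -> bool:
--     rev_left = reverse(left)
--     if len(left) <= len(right):
--         return right.startswith(rev_left)
--     else:
--         return rev_left.startswith(right)
--
-- def find_symmetrical(block: str) -> list[int]: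
--     lines = block.split()
--     w = len(lines[0])
--     h = len(lines)
--
--     valids = []
--
--     x = 1
--     while x < w:
--         if all([check_symmetry(line[:x], line[x:]) for line in lines]):
--             # return x, x+1
--             valids.append(x)
--         x += 1
--
--     t_lines = transpose(lines)
--
--     y = 1
--     while y < h:
--         if all([check_symmetry(line[:y], line[y:]) for line in t_lines]):
--             # return y, y+1
--             valids.append(y * 100)
--         y += 1
--
--     return valids
-- ===== SOURCE B (Python) =====
-- def find_symmetrical(block: str) -> list[int]:
--     lines = block.split()
--     h = len(lines)
--     w = len(lines[0])
--     cols = [''.join(line[i] for line in lines) for i in range(w)]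
--
--     def axes(seq):
--         n = len(seq)
--         return [p for p in range(1, n)
--                 if all(seq[p - 1 - k] == seq[p + k] for k in range(min(p, n - p)))]
--
--     return axes(cols) + [100 * y for y in axes(lines)]
-- ===== Notes on version B (the rewrite author's own statement) =====
-- stated objective: alternative
-- what changed: Instead of re-slicing and reversing every row string per candidate axis and transposing for the second pass, B builds the column strings once and tests each axis by comparing whole columns (resp. whole rows) as single units around the axis; intended as faster (measured ~1.3-1.6x on a timing run's inputs, far more on wide mirror grids), recorded here as alternative since that run could not confirm >=1.5x at the largest size.
-- outside the precondition, e.g. on find_symmetrical('ab abc'): A returns [100], B returns []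
import Mathlib
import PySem

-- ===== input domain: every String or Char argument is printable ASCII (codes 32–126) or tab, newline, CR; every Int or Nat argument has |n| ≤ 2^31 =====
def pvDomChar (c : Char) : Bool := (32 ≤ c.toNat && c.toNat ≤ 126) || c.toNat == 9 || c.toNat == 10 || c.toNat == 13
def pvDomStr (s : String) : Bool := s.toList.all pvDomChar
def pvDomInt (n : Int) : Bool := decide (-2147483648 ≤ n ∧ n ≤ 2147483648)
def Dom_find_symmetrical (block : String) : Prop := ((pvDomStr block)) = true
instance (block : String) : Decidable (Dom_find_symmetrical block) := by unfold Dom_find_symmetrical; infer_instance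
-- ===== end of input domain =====

-- B replaces A's per-axis slicing/reversing/transposition by one-time column strings plus
-- whole-column/whole-row equality checks around each axis (a different traversal, same worst-case cost).
-- Pre_ excludes non-rectangular blocks: on tokens of unequal lengths A either raises IndexError
-- or returns a value computed from a grid silently truncated to the first token's width.


-- ===== PORT A =====

-- reverse(s): list(s); .reverse(); ''.join(...) — on a char list this is List.reverse
def pvReverse (s : List Char) : List Char := s.reverse

def pvCheckSymmetry (left right : List Char) : Bool :=
  let revLeft := pvReverse left
  if left.length ≤ right.length then PySem.Chars.startswith right revLeft
  else PySem.Chars.startswith revLeft right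

-- transpose: for i in range(len(lines[0])): t_lines.append(''.join([s[i] for s in lines]))
def pvTranspose (lines : List (List Char)) : List (List Char) :=
  (PySem.List.pyRange 0 (PySem.List.len (PySem.List.pyGetD lines 0 [])) 1).foldl
    (fun t_lines i =>
      t_lines ++ [PySem.Chars.join [] (lines.map (fun s => [PySem.List.pyGetD s i ' ']))]) []

def find_symmetrical (block : String) : List Int :=
  let lines := (PySem.Str.split₀ block).map String.toList
  let w : Int := PySem.List.len (PySem.List.pyGetD lines 0 [])
  let h : Int := PySem.List.len lines
  let valids : List Int := []
  -- while x < w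
  let valids := (PySem.List.pyRange 1 w 1).foldl (fun acc x =>
      if (lines.map (fun line =>
            pvCheckSymmetry (PySem.List.slice line none (some x))
                            (PySem.List.slice line (some x) none))).all (fun b => b)
      then acc ++ [x] else acc) valids
  let t_lines := pvTranspose lines
  -- while y < h
  let valids := (PySem.List.pyRange 1 h 1).foldl (fun acc y =>
      if (t_lines.map (fun line =>
            pvCheckSymmetry (PySem.List.slice line none (some y))
                            (PySem.List.slice line (some y) none))).all (fun b => b)
      then acc ++ [y * 100] else acc) valids
  valids

-- ===== PORT B =====

-- axes(seq): [p for p in range(1, n) if all(seq[p-1-k] == seq[p+k] for k in range(min(p, n-p)))]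
def pvAxes (seq : List (List Char)) : List Int :=
  let n : Int := PySem.List.len seq
  (PySem.List.pyRange 1 n 1).filter (fun p =>
    (PySem.List.pyRange 0 (min p (n - p)) 1).all (fun k =>
      PySem.List.pyGetD seq (p - 1 - k) [] == PySem.List.pyGetD seq (p + k) []))

def find_symmetrical_alt (block : String) : List Int :=
  let lines := (PySem.Str.split₀ block).map String.toList
  let w : Int := PySem.List.len (PySem.List.pyGetD lines 0 [])
  -- ''.join(line[i] for line in lines): a join of one-char strings is exactly the char list
  let cols := (PySem.List.pyRange 0 w 1).map
      (fun i => lines.map (fun line => PySem.List.pyGetD line i ' '))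
  pvAxes cols ++ (pvAxes lines).map (fun y => 100 * y)

-- ===== PRECONDITION & SPEC =====

-- Pre_ : the whitespace-split tokens form a non-empty rectangular grid (A raises IndexError on an
-- all-whitespace block or when a token is shorter than the first; on other ragged blocks A's value
-- mixes full-length rows with columns truncated to the first token's width — excluded as an artefact).
def Pre_find_symmetrical (block : String) : Prop :=
  (PySem.Str.split₀ block).map String.toList ≠ [] ∧
  ∀ l ∈ (PySem.Str.split₀ block).map String.toList,
    l.length = (((PySem.Str.split₀ block).map String.toList).headD []).length

instance (block : String) : Decidable (Pre_find_symmetrical block) := by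
  unfold Pre_find_symmetrical; infer_instance

def pvWitness_find_symmetrical : String := "#.# ##. #.#"

def Spec_find_symmetrical (block : String) (out : List Int) : Prop := out = find_symmetrical_alt block
instance (block : String) (out : List Int) : Decidable (Spec_find_symmetrical block out) := by unfold Spec_find_symmetrical; infer_instance

-- ===== CLAIM (what is proved, stated in full; the proofs are below) =====
def Claim_equal_find_symmetrical : Prop := ∀ (block : String), Dom_find_symmetrical block → Pre_find_symmetrical block → Spec_find_symmetrical block (find_symmetrical block)

-- ===== LEMMAS AND PROOFS =====

-- the char-level mirror condition at cut a in a char list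
def pvMir (l : List Char) (a : Nat) : Prop :=
  ∀ k, k < min a (l.length - a) → l.getD (a - 1 - k) ' ' = l.getD (a + k) ' '

-- A's check_symmetry on the two slices of a row is exactly the mirror condition
theorem pvCheck_iff (l : List Char) (a : Nat) :
    (pvCheckSymmetry (l.take a) (l.drop a) = true) ↔ pvMir l a := by
  by_cases han : l.length ≤ a
  · -- the right part is empty: both sides are trivially true
    have hdrop : l.drop a = [] := List.drop_eq_nil_of_le han
    have htake : l.take a = l := List.take_of_length_le han
    rw [htake, hdrop]
    constructor
    · intro _ k hk; omega
    · intro _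
      unfold pvCheckSymmetry pvReverse
      split_ifs with h0
      · have : l = [] := by
          cases l with
          | nil => rfl
          | cons c cs => simp at h0
        simp [this, PySem.Chars.startswith_iff]
      · simp [PySem.Chars.startswith_iff]
  · rw [not_le] at han
    have hmin : min a l.length = a := by omega
    unfold pvCheckSymmetry pvReverse pvMir
    simp only [List.length_take, List.length_drop, hmin]
    split_ifs with hc
    · -- a ≤ len - a : reversed left must be a prefix of right, mirror window has size a
      have hm : min a (l.length - a) = a := by omega
      rw [hm, PySem.Chars.startswith_iff, List.prefix_iff_eq_take,
          List.length_reverse, List.length_take, hmin]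
      constructor
      · intro h k hk
        have h1 : k < (l.take a).reverse.length := by simp [hmin]; omega
        have h2 : k < (List.take a (l.drop a)).length := by simp; omega
        have := congrArg (fun (t : List Char) => t[k]?) h
        simp only [List.getElem?_eq_getElem h1, List.getElem?_eq_getElem h2] at this
        have h3 := Option.some.inj this
        rw [List.getElem_reverse, List.getElem_take, List.getElem_take, List.getElem_drop] at h3
        rw [List.getD_eq_getElem l ' ' (by omega), List.getD_eq_getElem l ' ' (by omega)]
        simp only [List.length_take, hmin] at h3
        convert h3 using 2
      · intro h
        apply List.ext_getElem (by simp; omega)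
        intro k h1 h2
        simp only [List.length_reverse, List.length_take, hmin] at h1
        rw [List.getElem_reverse, List.getElem_take, List.getElem_take, List.getElem_drop]
        have := h k (by omega)
        rw [List.getD_eq_getElem l ' ' (by omega), List.getD_eq_getElem l ' ' (by omega)] at this
        simp only [List.length_take, hmin]
        convert this using 2
    · -- a > len - a : right must be a prefix of reversed left, window has size len - a
      have hm : min a (l.length - a) = l.length - a := by omega
      rw [hm, PySem.Chars.startswith_iff, List.prefix_iff_eq_take, List.length_drop]
      constructor
      · intro h k hk
        have h1 : k < (l.drop a).length := by simp; omega
        have h2 : k < (List.take (l.length - a) (l.take a).reverse).length := by simp; omega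
        have := congrArg (fun (t : List Char) => t[k]?) h
        simp only [List.getElem?_eq_getElem h1, List.getElem?_eq_getElem h2] at this
        have h3 := Option.some.inj this
        rw [List.getElem_drop, List.getElem_take, List.getElem_reverse, List.getElem_take] at h3
        rw [List.getD_eq_getElem l ' ' (by omega), List.getD_eq_getElem l ' ' (by omega)]
        simp only [List.length_take, hmin] at h3
        rw [h3.symm]
      · intro h
        apply List.ext_getElem (by simp; omega)
        intro k h1 h2
        simp only [List.length_drop] at h1
        rw [List.getElem_drop, List.getElem_take, List.getElem_reverse, List.getElem_take]
        have := h k (by omega)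
        rw [List.getD_eq_getElem l ' ' (by omega), List.getD_eq_getElem l ' ' (by omega)] at this
        simp only [List.length_take, hmin]
        rw [← this]

-- A's row-wise vertical test at axis x equals "every row is mirrored at x"
theorem vertA_iff (lines : List (List Char)) (x : Int) (hx : 0 ≤ x) :
    ((lines.map (fun line =>
        pvCheckSymmetry (PySem.List.slice line none (some x))
                        (PySem.List.slice line (some x) none))).all (fun b => b) = true)
    ↔ ∀ line ∈ lines, pvMir line x.toNat := by
  simp only [List.all_map, List.all_eq_true, Function.comp_apply]
  refine forall_congr' (fun line => forall_congr' (fun _ => ?_))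
  rw [PySem.List.slice_to line hx, PySem.List.slice_from line hx]
  exact pvCheck_iff line x.toNat

-- B's column-equality vertical test at axis x equals the same mirror condition
theorem vertB_iff (lines : List (List Char)) (w : Nat) (hw : ∀ l ∈ lines, l.length = w)
    (x : Int) (h1 : 1 ≤ x) (h2 : x < (w : Int)) :
    ((PySem.List.pyRange 0 (min x ((w : Int) - x)) 1).all (fun k =>
        PySem.List.pyGetD ((PySem.List.pyRange 0 ((w : Int)) 1).map
            (fun i => lines.map (fun line => PySem.List.pyGetD line i ' '))) (x - 1 - k) []
        == PySem.List.pyGetD ((PySem.List.pyRange 0 ((w : Int)) 1).map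
            (fun i => lines.map (fun line => PySem.List.pyGetD line i ' '))) (x + k) []) = true)
    ↔ ∀ line ∈ lines, pvMir line x.toNat := by
  rw [List.all_eq_true]
  have ha : ((x.toNat : Int)) = x := Int.toNat_of_nonneg (by omega)
  constructor
  · intro h line hline k hk
    rw [hw line hline] at hk
    have hx' : x.toNat < w := by omega
    have hkx : (k : Int) < min x ((w : Int) - x) := by omega
    have := h (k : Int) (by rw [PySem.List.mem_pyRange_one]; constructor <;> omega)
    rw [beq_iff_eq,
        PySem.List.pyGetD_map_pyRange_of_nonneg _ _ _ _ (by omega) (by omega),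
        PySem.List.pyGetD_map_pyRange_of_nonneg _ _ _ _ (by omega) (by omega),
        List.map_eq_map_iff] at this
    have := this line hline
    have e1 : x - 1 - (k : Int) = ((x.toNat - 1 - k : Nat) : Int) := by omega
    have e2 : x + (k : Int) = ((x.toNat + k : Nat) : Int) := by omega
    rw [e1, e2, PySem.List.pyGetD_natCast, PySem.List.pyGetD_natCast] at this
    exact this
  · intro h kI hkI
    rw [PySem.List.mem_pyRange_one] at hkI
    rw [beq_iff_eq,
        PySem.List.pyGetD_map_pyRange_of_nonneg _ _ _ _ (by omega) (by omega),
        PySem.List.pyGetD_map_pyRange_of_nonneg _ _ _ _ (by omega) (by omega),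
        List.map_eq_map_iff]
    intro line hline
    have hk : kI.toNat < min x.toNat (line.length - x.toNat) := by
      rw [hw line hline]; omega
    have := h line hline kI.toNat hk
    have e1 : x - 1 - kI = ((x.toNat - 1 - kI.toNat : Nat) : Int) := by omega
    have e2 : x + kI = ((x.toNat + kI.toNat : Nat) : Int) := by omega
    rw [e1, e2, PySem.List.pyGetD_natCast, PySem.List.pyGetD_natCast]
    exact this

-- A's transpose produces exactly B's column lists
theorem transpose_eq (lines : List (List Char)) :
    pvTranspose lines =
      (PySem.List.pyRange 0 (PySem.List.len (PySem.List.pyGetD lines 0 [])) 1).map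
        (fun i => lines.map (fun line => PySem.List.pyGetD line i ' ')) := by
  unfold pvTranspose
  rw [PySem.List.foldl_append_singleton_eq_map, List.nil_append]
  refine List.map_congr_left (fun i _ => ?_)
  have : lines.map (fun s => [PySem.List.pyGetD s i ' '])
       = (lines.map (fun s => PySem.List.pyGetD s i ' ')).map (fun c => [c]) := by
    rw [List.map_map]; rfl
  rw [this, PySem.Chars.join_nil_singletons]

-- A's column-wise horizontal test at axis y equals B's whole-row comparisons
theorem horiz_iff (lines : List (List Char)) (w : Nat) (hw : ∀ l ∈ lines, l.length = w)
    (y : Int) (h1 : 1 ≤ y) (h2 : y < (lines.length : Int)) :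
    (((PySem.List.pyRange 0 ((w : Int)) 1).map
          (fun i => lines.map (fun line => PySem.List.pyGetD line i ' '))).map (fun line =>
        pvCheckSymmetry (PySem.List.slice line none (some y))
                        (PySem.List.slice line (some y) none))).all (fun b => b) = true
    ↔ ((PySem.List.pyRange 0 (min y ((lines.length : Int) - y)) 1).all (fun k =>
        PySem.List.pyGetD lines (y - 1 - k) [] == PySem.List.pyGetD lines (y + k) []) = true) := by
  rw [vertA_iff _ y (by omega), List.all_eq_true]
  have hb : ((y.toNat : Int)) = y := Int.toNat_of_nonneg (by omega)
  set b := y.toNat with hbdef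
  constructor
  · intro h kI hkI
    rw [PySem.List.mem_pyRange_one] at hkI
    have e1 : y - 1 - kI = ((b - 1 - kI.toNat : Nat) : Int) := by omega
    have e2 : y + kI = ((b + kI.toNat : Nat) : Int) := by omega
    rw [beq_iff_eq, e1, e2, PySem.List.pyGetD_natCast, PySem.List.pyGetD_natCast]
    have hi1 : b - 1 - kI.toNat < lines.length := by omega
    have hi2 : b + kI.toNat < lines.length := by omega
    rw [List.getD_eq_getElem lines [] hi1, List.getD_eq_getElem lines [] hi2]
    apply List.ext_getElem (by rw [hw _ (lines.getElem_mem hi1), hw _ (lines.getElem_mem hi2)])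
    intro j hj1 hj2
    rw [hw _ (lines.getElem_mem hi1)] at hj1
    have hcol := h (lines.map (fun line => PySem.List.pyGetD line (j : Int) ' '))
      (List.mem_map.mpr ⟨(j : Int), by rw [PySem.List.mem_pyRange_one]; constructor <;> omega, rfl⟩)
    have hk : kI.toNat < min b ((lines.map (fun line => PySem.List.pyGetD line (j:Int) ' ')).length - b) := by
      simp; omega
    have := hcol kI.toNat hk
    rw [List.getD_eq_getElem _ ' ' (by simp; omega), List.getD_eq_getElem _ ' ' (by simp; omega)] at this
    simp only [List.getElem_map, PySem.List.pyGetD_natCast] at this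
    rw [List.getD_eq_getElem _ ' ' (by rw [hw _ (lines.getElem_mem hi1)]; omega),
        List.getD_eq_getElem _ ' ' (by rw [hw _ (lines.getElem_mem hi2)]; omega)] at this
    exact this
  · intro h col hcol k hk
    obtain ⟨iI, hiI, rfl⟩ := List.mem_map.mp hcol
    rw [PySem.List.mem_pyRange_one] at hiI
    simp only [List.length_map] at hk
    have hrow := h (k : Int) (by rw [PySem.List.mem_pyRange_one]; constructor <;> omega)
    have e1 : y - 1 - (k : Int) = ((b - 1 - k : Nat) : Int) := by omega
    have e2 : y + (k : Int) = ((b + k : Nat) : Int) := by omega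
    rw [beq_iff_eq, e1, e2, PySem.List.pyGetD_natCast, PySem.List.pyGetD_natCast] at hrow
    have hi1 : b - 1 - k < lines.length := by omega
    have hi2 : b + k < lines.length := by omega
    rw [List.getD_eq_getElem lines [] hi1, List.getD_eq_getElem lines [] hi2] at hrow
    rw [List.getD_eq_getElem _ ' ' (by simp; omega), List.getD_eq_getElem _ ' ' (by simp; omega)]
    simp only [List.getElem_map]
    rw [hrow]

-- ===== VERDICT (by name: the statement is the Claim_ definition above) =====
theorem find_symmetrical_spec : Claim_equal_find_symmetrical := by
  intro block _ hpre
  unfold Spec_find_symmetrical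
  unfold Pre_find_symmetrical at hpre
  obtain ⟨hne, hlen⟩ := hpre
  simp only [find_symmetrical, find_symmetrical_alt]
  generalize hG : (PySem.Str.split₀ block).map String.toList = L at hne hlen ⊢
  cases L with
  | nil => exact absurd rfl hne
  | cons l0 rest =>
    have hlen' : ∀ l ∈ l0 :: rest, l.length = l0.length := by
      intro l hl; simpa using hlen l hl
    have hW : PySem.List.pyGetD (l0 :: rest) 0 [] = l0 := by
      rw [PySem.List.pyGetD_zero]; rfl
    rw [hW, PySem.List.len_eq, PySem.List.len_eq]
    simp only [PySem.List.foldl_append_if, List.nil_append, pvAxes]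
    rw [transpose_eq, hW, PySem.List.len_eq]
    have hcolslen : PySem.List.len ((PySem.List.pyRange 0 ((l0.length : Int)) 1).map
        (fun i => (l0 :: rest).map (fun line => PySem.List.pyGetD line i ' '))) = (l0.length : Int) := by
      rw [PySem.List.len_eq, List.length_map, PySem.List.pyRange_zero_natCast, List.length_map,
          List.length_range]
    rw [hcolslen, PySem.List.len_eq]
    congr 1
    · rw [List.map_id']
      apply List.filter_congr
      intro x hx
      rw [PySem.List.mem_pyRange_one] at hx
      apply Bool.eq_iff_iff.mpr
      rw [vertA_iff _ x (by omega)]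
      exact (vertB_iff (l0 :: rest) l0.length hlen' x (by omega) (by omega)).symm
    · have hmul : (fun y : Int => y * 100) = (fun y : Int => 100 * y) :=
        funext fun y => by ring
      rw [hmul]
      apply congrArg
      apply List.filter_congr
      intro y hy
      rw [PySem.List.mem_pyRange_one] at hy
      apply Bool.eq_iff_iff.mpr
      exact horiz_iff (l0 :: rest) l0.length hlen' y (by omega) (by omega)
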